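-- pv_equiv track=rewrite | github.com/loufa12/TSI_Project | genetic algorithm.py | assess_fitness
-- ===== SOURCE A (Python) =====
-- scrubbers = [("A1", 1, 1225), ("A2", 1.5, 1575), ("A3", 2.5, 2475), ("A4", 2.5, 1750),
--              ("A5", 3, 1750), ("A6", 3.5, 3150), ("A7", 2.5, 2700), ("A8", 2.5, 3150),
--              ("A9", 3.5, 3150), ("A10", 4, 3825), ("B1", 1.5, 1400), ("B2", 2.5, 1720),
--              ("B3", 3.5, 1720), ("B4", 3.5, 2200), ("B5", 5, 2200), ("C1", 8, 5600),
--              ("C2", 3, 2970), ("C3", 3.5, 2460), ("C4", 4.5, 7740), ("C5", 5, 9000)]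
--
-- def assess_fitness(population):
--     fitness_scores = []
--     for individual in population:
--         fitness = 0
--         for i in range(len(individual)):
--             site_scrubbers = individual[i]
--             site_productivity = sum([scrubbers[j][2] * site_scrubbers[j] for j in range(len(site_scrubbers))])
--             fitness += site_productivity
--         fitness_scores.append(fitness)
--     return fitness_scores
-- ===== SOURCE B (Python) =====
-- scrubbers = [("A1", 1, 1225), ("A2", 1.5, 1575), ("A3", 2.5, 2475), ("A4", 2.5, 1750),
--              ("A5", 3, 1750), ("A6", 3.5, 3150), ("A7", 2.5, 2700), ("A8", 2.5, 3150),
--              ("A9", 3.5, 3150), ("A10", 4, 3825), ("B1", 1.5, 1400), ("B2", 2.5, 1720),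
--              ("B3", 3.5, 1720), ("B4", 3.5, 2200), ("B5", 5, 2200), ("C1", 8, 5600),
--              ("C2", 3, 2970), ("C3", 3.5, 2460), ("C4", 4.5, 7740), ("C5", 5, 9000)]
--
-- _weights = [s[2] for s in scrubbers]
--
-- def assess_fitness(population):
--     result = []
--     for individual in population:
--         m = 0
--         for site in individual:
--             if len(site) > m:
--                 m = len(site)
--         tot = [0] * m
--         for site in individual:
--             for j, c in enumerate(site):
--                 tot[j] += c
--         result.append(sum(w * t for w, t in zip(_weights, tot)))
--     return result
-- ===== Notes on version B (the rewrite author's own statement) =====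
-- stated objective: alternative
-- what changed: B aggregates counts per scrubber index across all sites of an individual first (padded accumulator vector) and then applies the weights once as a single dot product, instead of A's per-site weighted sum accumulated site by site.
import Mathlib
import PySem

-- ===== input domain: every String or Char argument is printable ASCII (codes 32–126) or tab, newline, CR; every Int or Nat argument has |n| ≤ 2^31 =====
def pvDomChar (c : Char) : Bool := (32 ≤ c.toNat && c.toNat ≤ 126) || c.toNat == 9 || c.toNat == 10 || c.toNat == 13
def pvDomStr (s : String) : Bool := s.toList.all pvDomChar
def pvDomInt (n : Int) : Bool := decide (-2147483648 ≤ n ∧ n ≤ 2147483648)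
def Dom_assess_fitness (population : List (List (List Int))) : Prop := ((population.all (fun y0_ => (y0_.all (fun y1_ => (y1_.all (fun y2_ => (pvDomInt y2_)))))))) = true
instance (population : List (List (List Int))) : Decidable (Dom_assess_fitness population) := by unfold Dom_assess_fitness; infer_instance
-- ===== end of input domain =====

-- B aggregates counts per scrubber index first, then weights once; A weights each site and sums.
-- The equivalence is about return values only (neither program mutates its argument).

-- ===== PORT A =====
-- scrubbers[j][2] for the 20 scrubber tuples (all integers)
def pvWeights : List Int :=
  [1225, 1575, 2475, 1750, 1750, 3150, 2700, 3150, 3150, 3825,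
   1400, 1720, 1720, 2200, 2200, 5600, 2970, 2460, 7740, 9000]

def assess_fitness (population : List (List (List Int))) : List Int :=
  population.foldl
    (fun fitness_scores individual =>
      fitness_scores ++
        [individual.foldl
          (fun fitness site_scrubbers =>
            fitness +
              ((List.range site_scrubbers.length).map
                (fun j => pvWeights.getD j 0 * site_scrubbers.getD j 0)).sum)
          0])
    []

-- ===== PORT B =====
def pvAddSite : List Int → List Int → List Int
  | ts, [] => ts
  | [], _ :: _ => []
  | t :: ts, c :: cs => (t + c) :: pvAddSite ts cs

def pvDot (w t : List Int) : Int := (List.zipWith (· * ·) w t).sum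

def assess_fitness_alt (population : List (List (List Int))) : List Int :=
  population.map (fun individual =>
    let m := individual.foldl (fun a s => max a s.length) 0
    let tot := individual.foldl pvAddSite (List.replicate m 0)
    pvDot pvWeights tot)

-- ===== PRECONDITION & SPEC =====
-- Pre_ excludes exactly the inputs on which A raises IndexError: a site with more
-- than 20 counts makes A index scrubbers[j] out of range.
def Pre_assess_fitness (population : List (List (List Int))) : Prop :=
  ∀ individual ∈ population, ∀ site ∈ individual, site.length ≤ 20
instance (population : List (List (List Int))) : Decidable (Pre_assess_fitness population) := by
  unfold Pre_assess_fitness; infer_instance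

def pvWitness_assess_fitness : List (List (List Int)) := [[[1, 2], [3]], []]

def Spec_assess_fitness (population : List (List (List Int))) (out : List Int) : Prop := out = assess_fitness_alt population
instance (population : List (List (List Int))) (out : List Int) : Decidable (Spec_assess_fitness population out) := by unfold Spec_assess_fitness; infer_instance

-- ===== CLAIM (what is proved, stated in full; the proofs are below) =====
def Claim_equal_assess_fitness : Prop := ∀ (population : List (List (List Int))), Dom_assess_fitness population → Pre_assess_fitness population → Spec_assess_fitness population (assess_fitness population)

-- ===== LEMMAS AND PROOFS =====

theorem pv_foldl_append {α β : Type} (f : α → β) (l : List α) (acc : List β) :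
    l.foldl (fun a x => a ++ [f x]) acc = acc ++ l.map f := by
  induction l generalizing acc with
  | nil => simp
  | cons x xs ih => simp [List.foldl, ih]

theorem pv_foldl_add {α : Type} (g : α → Int) (l : List α) (c : Int) :
    l.foldl (fun a x => a + g x) c = c + (l.map g).sum := by
  induction l generalizing c with
  | nil => simp
  | cons x xs ih => simp [List.foldl, ih]; ring

theorem pv_addSite_length (tot site : List Int) (h : site.length ≤ tot.length) :
    (pvAddSite tot site).length = tot.length := by
  induction tot generalizing site with
  | nil => cases site with
    | nil => simp [pvAddSite]
    | cons c cs => simp at h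
  | cons t ts ih => cases site with
    | nil => simp [pvAddSite]
    | cons c cs =>
      simp only [pvAddSite, List.length_cons]
      rw [ih cs (by simpa using h)]

theorem pv_dot_addSite (w tot site : List Int) (h : site.length ≤ tot.length) :
    pvDot w (pvAddSite tot site) = pvDot w tot + pvDot w site := by
  induction w generalizing tot site with
  | nil => simp [pvDot]
  | cons x ws ih =>
    cases site with
    | nil => simp [pvAddSite, pvDot]
    | cons c cs =>
      cases tot with
      | nil => simp at h
      | cons t ts =>
        simp only [pvAddSite, pvDot, List.zipWith, List.sum_cons] at *
        rw [ih ts cs (by simpa using h)]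
        ring

theorem pv_dot_replicate (w : List Int) (m : ℕ) :
    pvDot w (List.replicate m 0) = 0 := by
  induction w generalizing m with
  | nil => simp [pvDot]
  | cons x ws ih =>
    cases m with
    | zero => simp [pvDot]
    | succ k =>
      simp only [List.replicate, pvDot, List.zipWith, List.sum_cons]
      have := ih k
      simp [pvDot] at this
      simp [this]

theorem pv_range_dot (w site : List Int) (h : site.length ≤ w.length) :
    ((List.range site.length).map (fun j => w.getD j 0 * site.getD j 0)).sum
      = pvDot w site := by
  induction site generalizing w with
  | nil => simp [pvDot]
  | cons c cs ih =>
    cases w with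
    | nil => simp at h
    | cons x ws =>
      rw [List.length_cons, List.range_succ_eq_map]
      simp only [List.map_cons, List.map_map, List.sum_cons, Function.comp_def,
        List.getD_cons_zero, List.getD_cons_succ]
      rw [ih ws (by simpa using h)]
      simp [pvDot]

theorem pv_foldl_max_ge (l : List (List Int)) (a : ℕ) :
    a ≤ l.foldl (fun a s => max a s.length) a := by
  induction l generalizing a with
  | nil => simp
  | cons x xs ih =>
    simp only [List.foldl]
    exact le_trans (le_max_left a x.length) (ih (max a x.length))

theorem pv_le_foldl_max (l : List (List Int)) (a : ℕ) (s : List Int) (hs : s ∈ l) :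
    s.length ≤ l.foldl (fun a s => max a s.length) a := by
  induction l generalizing a with
  | nil => cases hs
  | cons x xs ih =>
    simp only [List.foldl]
    rcases List.mem_cons.mp hs with h | h
    · subst h; exact le_trans (le_max_right a s.length) (pv_foldl_max_ge xs _)
    · exact ih _ h

theorem pv_foldl_addSite (w : List Int) (sites : List (List Int)) (tot : List Int)
    (h : ∀ s ∈ sites, s.length ≤ tot.length) :
    pvDot w (sites.foldl pvAddSite tot) = pvDot w tot + (sites.map (pvDot w)).sum := by
  induction sites generalizing tot with
  | nil => simp
  | cons s ss ih =>
    have hs : s.length ≤ tot.length := h s (List.mem_cons_self ..)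
    have hlen := pv_addSite_length tot s hs
    simp only [List.foldl, List.map_cons, List.sum_cons]
    rw [ih (pvAddSite tot s) (fun t ht => hlen ▸ h t (List.mem_cons_of_mem _ ht))]
    rw [pv_dot_addSite w tot s hs]
    ring

theorem assess_fitness_spec : Claim_equal_assess_fitness := by
  intro population _ hpre
  unfold Spec_assess_fitness assess_fitness assess_fitness_alt
  rw [pv_foldl_append]
  simp only [List.nil_append]
  refine List.map_congr_left ?_
  intro individual hind
  have hsites : ∀ site ∈ individual, site.length ≤ 20 := hpre individual hind
  set m := individual.foldl (fun a s => max a s.length) 0 with hm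
  have hlen : ∀ s ∈ individual, s.length ≤ (List.replicate m (0 : Int)).length := by
    intro s hsmem
    simpa using pv_le_foldl_max individual 0 s hsmem
  rw [pv_foldl_add, pv_foldl_addSite pvWeights individual _ hlen, pv_dot_replicate]
  simp only [zero_add]
  refine congrArg List.sum (List.map_congr_left ?_)
  intro site hsmem
  exact pv_range_dot pvWeights site (by simpa [pvWeights] using hsites site hsmem)
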